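-- pv_equiv track=rewrite | github.com/Hernimus/Draft-2-kp | b_testing/opac/admin/routes.py | generate_pagination
-- ===== SOURCE A (Python) =====
-- def generate_pagination(current_page, total_pages):
--     if total_pages <= 7: return list(range(1, total_pages + 1))
--     pages = {1, total_pages, current_page, current_page - 1, current_page - 2, current_page + 1, current_page + 2}
--     sorted_pages = sorted([p for p in pages if 1 <= p <= total_pages])
--     paginated_list = []
--     last_page = 0
--     for page in sorted_pages:
--         if last_page + 1 < page: paginated_list.append(None)
--         paginated_list.append(page)
--         last_page = page
--     return paginated_list
-- ===== SOURCE B (Python) =====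
-- def generate_pagination(current_page, total_pages):
--     if total_pages <= 7:
--         return list(range(1, total_pages + 1))
--     # pages shown between 1 and total_pages: the current-page window clipped to (1, total_pages)
--     lo = max(current_page - 2, 2)
--     hi = min(current_page + 2, total_pages - 1)
--     mid = list(range(lo, hi + 1))
--     out = [1]
--     last = 1
--     if mid:
--         if mid[0] > 2:
--             out.append(None)
--         out.extend(mid)
--         last = mid[-1]
--     if total_pages > last + 1:
--         out.append(None)
--     out.append(total_pages)
--     return out
-- ===== Notes on version B (the rewrite author's own statement) =====
-- stated objective: simpler
-- what changed: B replaces A's bounded-set construction, list-comprehension filter, sort and gap-scanning fold by a closed-form assembly: clip the current-page window to [2, total_pages-1] and concatenate [1], an optional gap marker, the window, an optional gap marker and [total_pages].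
import Mathlib
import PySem

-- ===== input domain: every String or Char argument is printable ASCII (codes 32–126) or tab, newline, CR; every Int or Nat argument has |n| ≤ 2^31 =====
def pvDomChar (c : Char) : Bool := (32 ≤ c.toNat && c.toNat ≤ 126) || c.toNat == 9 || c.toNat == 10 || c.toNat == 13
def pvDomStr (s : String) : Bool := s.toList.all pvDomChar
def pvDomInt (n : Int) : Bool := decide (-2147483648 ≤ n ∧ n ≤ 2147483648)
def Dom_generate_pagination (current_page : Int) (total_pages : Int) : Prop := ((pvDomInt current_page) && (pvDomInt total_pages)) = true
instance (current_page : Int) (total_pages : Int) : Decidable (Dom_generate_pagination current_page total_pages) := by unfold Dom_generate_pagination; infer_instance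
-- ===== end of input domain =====

-- B assembles the pagination list in closed form ([1], optional gap, the clipped current-page
-- window, optional gap, [total_pages]) instead of A's set + filter + sort + gap-scanning loop.


-- ===== PORT A =====
def generate_pagination (current_page : Int) (total_pages : Int) : List (Option Int) :=
  if total_pages ≤ 7 then (PySem.List.pyRange 1 (total_pages + 1) 1).map some
  else
    let pages : List Int := PySem.Set.ofList [1, total_pages, current_page,
      current_page - 1, current_page - 2, current_page + 1, current_page + 2]
    let sorted_pages := PySem.List.sorted
      (pages.filter (fun p => decide (1 ≤ p) && decide (p ≤ total_pages))) (fun x => x) false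
    let r := sorted_pages.foldl
      (fun (st : List (Option Int) × Int) page =>
        let st1 := if st.2 + 1 < page then st.1 ++ [none] else st.1
        (st1 ++ [some page], page)) ([], 0)
    r.1

-- ===== PORT B =====
def generate_pagination_alt (current_page : Int) (total_pages : Int) : List (Option Int) :=
  if total_pages ≤ 7 then (PySem.List.pyRange 1 (total_pages + 1) 1).map some
  else
    let lo := max (current_page - 2) 2
    let hi := min (current_page + 2) (total_pages - 1)
    let mid := PySem.List.pyRange lo (hi + 1) 1
    let out : List (Option Int) := [some 1]
    let last : Int := 1
    let st :=
      if mid ≠ [] then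
        (out ++ (if mid.head! > 2 then [none] else []) ++ mid.map some, mid.getLast!)
      else (out, last)
    let out2 := if total_pages > st.2 + 1 then st.1 ++ [none] else st.1
    out2 ++ [some total_pages]

-- ===== PRECONDITION & SPEC =====
def Spec_generate_pagination (current_page : Int) (total_pages : Int) (out : List (Option Int)) : Prop := out = generate_pagination_alt current_page total_pages
instance (current_page : Int) (total_pages : Int) (out : List (Option Int)) : Decidable (Spec_generate_pagination current_page total_pages out) := by unfold Spec_generate_pagination; infer_instance

-- ===== CLAIM (what is proved, stated in full; the proofs are below) =====
def Claim_equal_generate_pagination : Prop := ∀ (current_page : Int) (total_pages : Int), Dom_generate_pagination current_page total_pages → Spec_generate_pagination current_page total_pages (generate_pagination current_page total_pages)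

-- ===== LEMMAS AND PROOFS =====

def pvStep (st : List (Option Int) × Int) (page : Int) : List (Option Int) × Int :=
  let st1 := if st.2 + 1 < page then st.1 ++ [none] else st.1
  (st1 ++ [some page], page)

theorem fold_run (n : Nat) : ∀ (a last : Int) (acc : List (Option Int)),
    (PySem.List.pyRange a (a + (n + 1)) 1).foldl pvStep (acc, last)
    = (acc ++ (if last + 1 < a then [none] else []) ++ (PySem.List.pyRange a (a + (n + 1)) 1).map some, a + n) := by
  induction n with
  | zero =>
    intro a last acc
    have : a + ((0 : Nat) + 1) = a + 1 := by omega
    rw [this, PySem.List.pyRange_one_singleton]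
    simp [pvStep]
    split_ifs <;> simp
  | succ n ih =>
    intro a last acc
    have hlt : a < a + ((n : Int) + 1 + 1) := by omega
    have h1 : a + ((n + 1 : Nat) + 1) = a + ((n : Int) + 1 + 1) := by omega
    rw [h1, PySem.List.pyRange_one_cons (by omega)]
    have h2 : a + ((n : Int) + 1 + 1) = (a + 1) + ((n : Nat) + 1) := by omega
    rw [h2]
    simp only [List.foldl_cons]
    have hstep : pvStep (acc, last) a = (acc ++ (if last + 1 < a then [none] else []) ++ [some a], a) := by
      simp [pvStep]; split_ifs <;> simp
    rw [hstep, ih (a + 1) a]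
    have h3 : ¬ (a + 1 < a + 1) := by omega
    simp only [h3, if_false, List.map_cons]
    refine Prod.ext ?_ (by simp; omega)
    simp

theorem sorted_pages_eq (current_page total_pages : Int) (h : 7 < total_pages) :
    PySem.List.sorted
      ((PySem.Set.ofList [1, total_pages, current_page,
        current_page - 1, current_page - 2, current_page + 1, current_page + 2] : List Int).filter
        (fun p => decide (1 ≤ p) && decide (p ≤ total_pages))) (fun x => x) false
    = 1 :: (PySem.List.pyRange (max (current_page - 2) 2)
            (min (current_page + 2) (total_pages - 1) + 1) 1 ++ [total_pages]) := by
  set lo := max (current_page - 2) 2 with hlo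
  set hi := min (current_page + 2) (total_pages - 1) with hhi
  have hlo2 : 2 ≤ lo := le_max_right _ _
  have hhi2 : hi ≤ total_pages - 1 := min_le_right _ _
  have hpw : (1 :: (PySem.List.pyRange lo (hi + 1) 1 ++ [total_pages])).Pairwise (· < ·) := by
    refine List.pairwise_cons.mpr ⟨?_, ?_⟩
    · intro a ha
      rcases List.mem_append.mp ha with hr | hs
      · have := (PySem.List.mem_pyRange_one).mp hr; omega
      · simp at hs; omega
    · refine List.pairwise_append.mpr ⟨PySem.List.pairwise_lt_pyRange_one _ _, by simp, ?_⟩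
      intro a ha b hb
      simp at hb; subst hb
      have := (PySem.List.mem_pyRange_one).mp ha; omega
  apply PySem.List.sorted_eq_of_perm_of_pairwise_lt
  · apply (List.perm_ext_iff_of_nodup ?_ ?_).mpr
    · intro a
      simp only [List.mem_cons, List.mem_append, PySem.List.mem_pyRange_one,
        List.mem_filter, PySem.Set.mem_ofList, List.not_mem_nil,
        or_false, Bool.and_eq_true, decide_eq_true_eq]
      constructor
      · rintro (rfl | ⟨h1, h2⟩ | rfl) <;> omega
      · rintro ⟨(rfl | rfl | rfl | rfl | rfl | rfl | rfl), h1, h2⟩ <;> omega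
    · exact hpw.imp (fun hab => ne_of_lt hab)
    · exact (PySem.Set.nodup_ofList _).filter _
  · exact hpw

theorem main : ∀ (current_page total_pages : Int),
    (if total_pages ≤ 7 then (PySem.List.pyRange 1 (total_pages + 1) 1).map some
     else
      let pages : List Int := PySem.Set.ofList [1, total_pages, current_page,
        current_page - 1, current_page - 2, current_page + 1, current_page + 2]
      let sorted_pages := PySem.List.sorted
        (pages.filter (fun p => decide (1 ≤ p) && decide (p ≤ total_pages))) (fun x => x) false
      let r := sorted_pages.foldl pvStep ([], 0)
      r.1)
    =
    (if total_pages ≤ 7 then (PySem.List.pyRange 1 (total_pages + 1) 1).map some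
     else
      let lo := max (current_page - 2) 2
      let hi := min (current_page + 2) (total_pages - 1)
      let mid := PySem.List.pyRange lo (hi + 1) 1
      let out : List (Option Int) := [some 1]
      let last : Int := 1
      let st :=
        if mid ≠ [] then
          (out ++ (if mid.head! > 2 then [none] else []) ++ mid.map some, mid.getLast!)
        else (out, last)
      let out2 := if total_pages > st.2 + 1 then st.1 ++ [none] else st.1
      out2 ++ [some total_pages]) := by
  intro cp tp
  by_cases htp : tp ≤ 7
  · simp [htp]
  · simp only [if_neg htp]
    have h7 : 7 < tp := by omega
    rw [sorted_pages_eq cp tp h7]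
    set lo := max (cp - 2) 2 with hlo
    set hi := min (cp + 2) (tp - 1) with hhi
    have hlo2 : 2 ≤ lo := le_max_right _ _
    have hhi2 : hi ≤ tp - 1 := min_le_right _ _
    simp only [List.foldl_cons]
    have hinit : pvStep ([], 0) 1 = ([some 1], 1) := by simp [pvStep]
    rw [hinit, List.foldl_append]
    by_cases hle : lo ≤ hi
    · -- nonempty mid
      have hne : PySem.List.pyRange lo (hi + 1) 1 ≠ [] := by
        rw [PySem.List.pyRange_one_cons (by omega)]; simp
      set n : Nat := (hi - lo).toNat with hn
      have hsplit : hi + 1 = lo + ((n : Int) + 1) := by omega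
      rw [hsplit, fold_run n lo 1]
      have hlast : lo + (n : Int) = hi := by omega
      have hhead : (PySem.List.pyRange lo (lo + ((n : Int) + 1)) 1).head! = lo := by
        rw [PySem.List.pyRange_one_cons (by omega)]; rfl
      have hgetLast : (PySem.List.pyRange lo (lo + ((n : Int) + 1)) 1).getLast! = hi := by
        have : lo + ((n : Int) + 1) = hi + 1 := by omega
        rw [this, PySem.List.pyRange_one_succ_right (by omega)]
        simp
      have hne' : PySem.List.pyRange lo (lo + ((n : Int) + 1)) 1 ≠ [] := by
        rw [PySem.List.pyRange_one_cons (by omega)]; simp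
      simp only [List.foldl_cons, List.foldl_nil, pvStep, hlast, hhead, hgetLast,
        if_pos hne', ne_eq]
      split_ifs <;> simp_all
    · -- empty mid
      have hnil : PySem.List.pyRange lo (hi + 1) 1 = [] := PySem.List.pyRange_one_eq_nil (by omega)
      rw [hnil]
      simp [pvStep]

-- ===== VERDICT (by name: the statement is the Claim_ definition above) =====
theorem generate_pagination_spec : Claim_equal_generate_pagination := by
  intro cp tp _
  unfold Spec_generate_pagination generate_pagination generate_pagination_alt
  exact main cp tp
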